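-- pv_equiv track=rewrite | github.com/CamMacFarlane/SHA3 | main.py | convertMatrixToString
-- ===== SOURCE A (Python) =====
-- def getW(lengthOfString):
--     return{
--     25:1,
--     50:2,
--     100:4,
--     200:8,
--     400:16,
--     800:32,
--     1600:64
--     }.get(lengthOfString, -1);
--
-- def convertMatrixToString(A, strlen):
--     w = getW(strlen)
--     SaL = list('x' * strlen)
--
--     for x in range(5):
--         for y in range(5):
--             for z in range(w):
--                SaL[w*(5*y + x) + z] = str(A[x][y][z])
--
--     SaS = "".join(SaL)
--     return SaS
-- ===== SOURCE B (Python) =====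
-- def getW(lengthOfString):
--     return{
--     25:1,
--     50:2,
--     100:4,
--     200:8,
--     400:16,
--     800:32,
--     1600:64
--     }.get(lengthOfString, -1);
--
-- def convertMatrixToString(A, strlen):
--     # Transpose the first 5x5 block with zip and flatten it: the output order is
--     # column-major over (y, x), so no flat-index arithmetic or preallocated
--     # buffer is needed; when strlen is not in the size table the result is
--     # the untouched 'x' * strlen buffer.
--     w = getW(strlen)
--     if w == -1:
--         return 'x' * strlen
--     return ''.join(str(v)
--                    for col in zip(*(row[:5] for row in A[:5]))
--                    for inner in col
--                    for v in inner[:w])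
-- ===== Notes on version B (the rewrite author's own statement) =====
-- stated objective: simpler
-- what changed: B transposes the 5x5 block with zip(*...) and flattens the sliced inner lists in output order, eliminating A's preallocated 'x' buffer and the flat-index scatter formula w*(5*y+x)+z entirely; when strlen is not in the size table it returns 'x'*strlen directly.
import Mathlib
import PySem

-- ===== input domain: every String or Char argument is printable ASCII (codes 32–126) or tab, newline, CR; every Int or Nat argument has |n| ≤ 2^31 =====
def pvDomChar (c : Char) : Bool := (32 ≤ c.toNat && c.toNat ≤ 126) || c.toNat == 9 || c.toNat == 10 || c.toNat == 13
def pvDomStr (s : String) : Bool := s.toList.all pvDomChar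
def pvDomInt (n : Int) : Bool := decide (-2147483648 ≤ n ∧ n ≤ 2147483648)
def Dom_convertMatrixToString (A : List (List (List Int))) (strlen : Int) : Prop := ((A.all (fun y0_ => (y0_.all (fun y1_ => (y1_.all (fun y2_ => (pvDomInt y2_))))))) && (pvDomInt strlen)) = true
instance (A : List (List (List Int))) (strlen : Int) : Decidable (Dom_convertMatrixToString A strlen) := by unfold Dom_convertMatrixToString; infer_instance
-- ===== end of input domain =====

-- B transposes the 5x5 block with zip(*…) and flattens the sliced inner lists in output
-- order instead of scattering entries by the flat-index formula into a preallocated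
-- 'x' buffer; objective: simpler, same cost.

-- ===== PORT A =====
def getW (lengthOfString : Int) : Int :=
  PySem.Dict.getD
    ((((((((PySem.Dict.empty.insert 25 1).insert 50 2).insert 100 4).insert 200 8).insert 400 16).insert 800 32).insert 1600 64) : PySem.Dict Int Int)
    lengthOfString (-1)

def convertMatrixToString (A : List (List (List Int))) (strlen : Int) : String :=
  let w := getW strlen
  let SaL := PySem.List.pyRepeat ["x"] strlen
  let SaL := (PySem.List.pyRange 0 5 1).foldl (fun SaL x =>
      (PySem.List.pyRange 0 5 1).foldl (fun SaL y =>
        (PySem.List.pyRange 0 w 1).foldl (fun SaL z =>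
          PySem.List.pySetD SaL (w * (5 * y + x) + z)
            (PySem.Int.toStr (PySem.List.pyGetD (PySem.List.pyGetD (PySem.List.pyGetD A x []) y []) z 0))) SaL) SaL) SaL
  PySem.Str.join "" SaL

-- ===== PORT B =====
-- exact hand port of Python's zip(*ls) (tuples as lists): the result has
-- min(len(l) for l in ls) rows (0 when ls is empty) and row i is [l[i] for l in ls];
-- the default d is never the value used, since i is below every length.
def pyZipStar {α : Type} (d : α) (ls : List (List α)) : List (List α) :=
  (List.range (((ls.map List.length).min?).getD 0)).map (fun i => ls.map (fun l => l.getD i d))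

def convertMatrixToString_alt (A : List (List (List Int))) (strlen : Int) : String :=
  let w := getW strlen
  if w = -1 then String.ofList (PySem.List.pyRepeat ['x'] strlen)  -- 'x' * strlen (exact: repeat of the single code point)
  else
    PySem.Str.join ""
      ((pyZipStar [] ((PySem.List.slice A none (some 5)).map (fun row => PySem.List.slice row none (some 5)))).flatMap
        (fun col => col.flatMap (fun inner =>
          (PySem.List.slice inner none (some w)).map PySem.Int.toStr)))

-- ===== PRECONDITION & SPEC =====
-- Pre_ excludes exactly the inputs where the Python A raises IndexError: strlen is in the
-- size table (w ≠ -1) but the matrix has fewer than 5 rows, a row with fewer than 5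
-- columns, or an inner list shorter than w.
def Pre_convertMatrixToString (A : List (List (List Int))) (strlen : Int) : Prop :=
  getW strlen = -1 ∨
    (5 ≤ A.length ∧ ∀ row ∈ A.take 5, 5 ≤ row.length ∧
      ∀ inner ∈ row.take 5, (getW strlen).toNat ≤ inner.length)
instance (A : List (List (List Int))) (strlen : Int) : Decidable (Pre_convertMatrixToString A strlen) := by unfold Pre_convertMatrixToString; infer_instance

def pvWitness_convertMatrixToString : List (List (List Int)) × Int :=
  (List.replicate 5 (List.replicate 5 [7]), 25)

def Spec_convertMatrixToString (A : List (List (List Int))) (strlen : Int) (out : String) : Prop := out = convertMatrixToString_alt A strlen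
instance (A : List (List (List Int))) (strlen : Int) (out : String) : Decidable (Spec_convertMatrixToString A strlen out) := by unfold Spec_convertMatrixToString; infer_instance

-- ===== CLAIM (what is proved, stated in full; the proofs are below) =====
def Claim_equal_convertMatrixToString : Prop := ∀ (A : List (List (List Int))) (strlen : Int), Dom_convertMatrixToString A strlen → Pre_convertMatrixToString A strlen → Spec_convertMatrixToString A strlen (convertMatrixToString A strlen)

-- ===== LEMMAS AND PROOFS =====

-- the value A's inner loop scatters for coordinates (x, y, z)
def entA (A : List (List (List Int))) (x y z : Int) : String :=
  PySem.Int.toStr (PySem.List.pyGetD (PySem.List.pyGetD (PySem.List.pyGetD A x []) y []) z 0)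

-- B's flattened transpose, in normal form (proof-side only)
def bnf (A : List (List (List Int))) (w : Nat) : List String :=
  (List.range 5).flatMap (fun y => (List.range 5).flatMap (fun x =>
    (List.range w).map (fun z => PySem.Int.toStr (((A.getD x []).getD y []).getD z 0))))

-- p lies in the block [w*c, w*c + w) iff p / w = c  (p given as w*k + r, r < w)
theorem band_iff (w c k r : Nat) (hr : r < w) :
    (w * c ≤ w * k + r ∧ w * k + r < w * c + w) ↔ k = c := by
  constructor
  · rintro ⟨h1, h2⟩
    rcases Nat.lt_trichotomy k c with h | h | h
    · have := Nat.mul_le_mul_left w h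
      simp only [Nat.mul_succ] at this
      omega
    · exact h
    · have := Nat.mul_le_mul_left w h
      simp only [Nat.mul_succ] at this
      omega
  · rintro rfl; omega

theorem zfold_length (w : Nat) (idx : Int → Int) (f : Int → String) (s : List String) :
    ((PySem.List.pyRange 0 (w:Int) 1).foldl
      (fun s z => PySem.List.pySetD s (idx z) (f z)) s).length = s.length := by
  induction w generalizing s with
  | zero => simp [PySem.List.pyRange_one_eq_nil]
  | succ n ih =>
    rw [show ((n+1 : Nat) : Int) = (n:Int) + 1 by push_cast; ring,
        PySem.List.pyRange_one_succ_right (by positivity), List.foldl_append]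
    simp [ih, PySem.List.length_pySetD]

-- element of A's inner z-loop result
theorem zfold_getElem? (w b : Nat) (f : Int → String) (s : List String)
    (hlen : b + w ≤ s.length) (p : Nat) :
    ((PySem.List.pyRange 0 (w:Int) 1).foldl
      (fun s z => PySem.List.pySetD s ((b:Int) + z) (f z)) s)[p]?
    = if b ≤ p ∧ p < b + w then some (f ((p:Int) - (b:Int))) else s[p]? := by
  induction w generalizing s with
  | zero =>
    rw [show ((0:Nat):Int) = 0 by simp, PySem.List.pyRange_one_eq_nil le_rfl]
    rw [List.foldl_nil, if_neg (by omega)]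
  | succ n ih =>
    rw [show ((n+1 : Nat) : Int) = (n:Int) + 1 by push_cast; ring,
        PySem.List.pyRange_one_succ_right (by positivity), List.foldl_append]
    simp only [List.foldl_cons, List.foldl_nil]
    rw [PySem.List.pySetD_of_nonneg _ _ (by positivity)]
    rw [show (((b:Int) + (n:Int)).toNat) = b + n by omega]
    rw [List.getElem?_set, zfold_length, ih s (by omega)]
    split_ifs <;> first
      | rfl
      | (exfalso; omega)
      | ((congr 2) <;> omega)

theorem yfold_length (w : Nat) (A : List (List (List Int))) (x : Int) (m : Nat) (s : List String) :
    ((PySem.List.pyRange 0 (m:Int) 1).foldl (fun SaL y =>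
      (PySem.List.pyRange 0 (w:Int) 1).foldl (fun SaL z =>
        PySem.List.pySetD SaL ((w:Int) * (5 * y + x) + z) (entA A x y z)) SaL) s).length
    = s.length := by
  induction m generalizing s with
  | zero => simp [PySem.List.pyRange_one_eq_nil]
  | succ n ih =>
    rw [show ((n+1 : Nat) : Int) = (n:Int) + 1 by push_cast; ring,
        PySem.List.pyRange_one_succ_right (by positivity), List.foldl_append]
    simp [ih, zfold_length]

theorem yfold_length5 (w : Nat) (A : List (List (List Int))) (x : Int) (s : List String) :
    ((PySem.List.pyRange 0 (5:Int) 1).foldl (fun SaL y =>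
      (PySem.List.pyRange 0 (w:Int) 1).foldl (fun SaL z =>
        PySem.List.pySetD SaL ((w:Int) * (5 * y + x) + z) (entA A x y z)) SaL) s).length
    = s.length := by
  simpa using yfold_length w A x 5 s

theorem yfold_getElem? (w : Nat) (hw : 0 < w) (A : List (List (List Int)))
    (xn : Nat) (hx : xn < 5) (m : Nat) (hm : m ≤ 5) (s : List String)
    (hlen : s.length = 25 * w) (p : Nat) :
    ((PySem.List.pyRange 0 (m:Int) 1).foldl (fun SaL y =>
      (PySem.List.pyRange 0 (w:Int) 1).foldl (fun SaL z =>
        PySem.List.pySetD SaL ((w:Int) * (5 * y + (xn:Int)) + z) (entA A (xn:Int) y z)) SaL) s)[p]?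
    = if p < 25 * w ∧ (p / w) % 5 = xn ∧ (p / w) / 5 < m
      then some (entA A (xn:Int) (((p / w) / 5 : Nat):Int) ((p % w : Nat):Int))
      else s[p]? := by
  induction m generalizing s with
  | zero =>
    rw [show ((0:Nat):Int) = 0 by simp, PySem.List.pyRange_one_eq_nil le_rfl, List.foldl_nil]
    rw [if_neg (by rintro ⟨-, -, h3⟩; exact absurd h3 (Nat.not_lt_zero _))]
  | succ n ih =>
    rw [show ((n+1 : Nat) : Int) = (n:Int) + 1 by push_cast; ring,
        PySem.List.pyRange_one_succ_right (by positivity), List.foldl_append]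
    simp only [List.foldl_cons, List.foldl_nil]
    have hfun : (fun (SaL : List String) (z : Int) =>
        PySem.List.pySetD SaL ((w:Int) * (5 * (n:Int) + (xn:Int)) + z) (entA A (xn:Int) (n:Int) z))
        = fun SaL z => PySem.List.pySetD SaL (((w * (5 * n + xn) : Nat):Int) + z) (entA A (xn:Int) (n:Int) z) := by
      funext SaL z
      have he : ((w:Int) * (5 * (n:Int) + (xn:Int)) + z) = ((w * (5 * n + xn) : Nat):Int) + z := by
        push_cast; ring
      rw [he]
    rw [hfun]
    have hble : w * (5 * n + xn) + w ≤ 25 * w := by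
      calc w * (5 * n + xn) + w = w * (5 * n + xn + 1) := by ring
        _ ≤ w * 25 := Nat.mul_le_mul_left w (by omega)
        _ = 25 * w := by ring
    rw [zfold_getElem? w (w * (5 * n + xn)) _ _ (by rw [yfold_length]; omega) p]
    rw [ih (by omega) s hlen]
    have hdm := Nat.div_add_mod p w
    have hrw : p % w < w := Nat.mod_lt _ hw
    set k := p / w with hk
    set r := p % w with hr0
    have hband := band_iff w (5 * n + xn) k r hrw
    rw [hdm] at hband
    by_cases hblk : k = 5 * n + xn
    · have hk25 : k ≤ 24 := by omega
      have hwk : w * k ≤ w * 24 := Nat.mul_le_mul_left w hk25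
      have hp25 : p < 25 * w := by omega
      rw [if_pos (hband.mpr hblk), if_pos ⟨hp25, by omega, by omega⟩]
      have harg : (p:Int) - ((w * (5 * n + xn) : Nat):Int) = (r:Int) := by
        rw [hblk] at hdm; omega
      rw [harg]
      congr 2
      omega
    · rw [if_neg (fun hc => hblk (hband.mp hc))]
      split_ifs <;> first
        | rfl
        | (exfalso; omega)

theorem yfold_getElem5? (w : Nat) (hw : 0 < w) (A : List (List (List Int)))
    (xn : Nat) (hx : xn < 5) (s : List String)
    (hlen : s.length = 25 * w) (p : Nat) :
    ((PySem.List.pyRange 0 (5:Int) 1).foldl (fun SaL y =>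
      (PySem.List.pyRange 0 (w:Int) 1).foldl (fun SaL z =>
        PySem.List.pySetD SaL ((w:Int) * (5 * y + (xn:Int)) + z) (entA A (xn:Int) y z)) SaL) s)[p]?
    = if p < 25 * w ∧ (p / w) % 5 = xn ∧ (p / w) / 5 < 5
      then some (entA A (xn:Int) (((p / w) / 5 : Nat):Int) ((p % w : Nat):Int))
      else s[p]? := by
  have h := yfold_getElem? w hw A xn hx 5 le_rfl s hlen p
  rw [show ((5:Nat):Int) = (5:Int) by norm_num] at h
  exact h

theorem xfold_length (w : Nat) (A : List (List (List Int))) (m : Nat) (s : List String) :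
    ((PySem.List.pyRange 0 (m:Int) 1).foldl (fun SaL x =>
      (PySem.List.pyRange 0 (5:Int) 1).foldl (fun SaL y =>
        (PySem.List.pyRange 0 (w:Int) 1).foldl (fun SaL z =>
          PySem.List.pySetD SaL ((w:Int) * (5 * y + x) + z) (entA A x y z)) SaL) SaL) s).length
    = s.length := by
  induction m generalizing s with
  | zero => simp [PySem.List.pyRange_one_eq_nil]
  | succ n ih =>
    rw [show ((n+1 : Nat) : Int) = (n:Int) + 1 by push_cast; ring,
        PySem.List.pyRange_one_succ_right (by positivity), List.foldl_append]
    simp only [List.foldl_cons, List.foldl_nil]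
    rw [yfold_length5, ih]

theorem xfold_getElem? (w : Nat) (hw : 0 < w) (A : List (List (List Int)))
    (m : Nat) (hm : m ≤ 5) (s : List String) (hlen : s.length = 25 * w) (p : Nat) :
    ((PySem.List.pyRange 0 (m:Int) 1).foldl (fun SaL x =>
      (PySem.List.pyRange 0 (5:Int) 1).foldl (fun SaL y =>
        (PySem.List.pyRange 0 (w:Int) 1).foldl (fun SaL z =>
          PySem.List.pySetD SaL ((w:Int) * (5 * y + x) + z) (entA A x y z)) SaL) SaL) s)[p]?
    = if p < 25 * w ∧ (p / w) % 5 < m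
      then some (entA A (((p / w) % 5 : Nat):Int) (((p / w) / 5 : Nat):Int) ((p % w : Nat):Int))
      else s[p]? := by
  induction m generalizing s with
  | zero =>
    rw [show ((0:Nat):Int) = 0 by simp, PySem.List.pyRange_one_eq_nil le_rfl, List.foldl_nil]
    rw [if_neg (by rintro ⟨-, h2⟩; exact absurd h2 (Nat.not_lt_zero _))]
  | succ n ih =>
    rw [show ((n+1 : Nat) : Int) = (n:Int) + 1 by push_cast; ring,
        PySem.List.pyRange_one_succ_right (by positivity), List.foldl_append]
    simp only [List.foldl_cons, List.foldl_nil]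
    rw [yfold_getElem5? w hw A n (by omega) _ (by rw [xfold_length]; omega) p]
    rw [ih (by omega) s hlen]
    have hdm := Nat.div_add_mod p w
    have hrw : p % w < w := Nat.mod_lt _ hw
    set k := p / w with hk
    set r := p % w with hr0
    have hk25 : p < 25 * w → k < 25 := by
      intro h
      by_contra hc
      have : w * 25 ≤ w * k := Nat.mul_le_mul_left w (by omega)
      omega
    by_cases hx : k % 5 = n
    · by_cases hp : p < 25 * w
      · have h5k : k / 5 < 5 := by have := hk25 hp; omega
        rw [if_pos ⟨hp, hx, h5k⟩, if_pos ⟨hp, by omega⟩]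
        congr 3
        omega
      · rw [if_neg (by tauto), if_neg (by tauto), if_neg (by tauto)]
    · rw [if_neg (by tauto)]
      split_ifs <;> first
        | rfl
        | (exfalso; omega)

-- take n of a long-enough list, written as a map over range n
theorem take_eq_range_map {α : Type} (d : α) (l : List α) (n : Nat) (h : n ≤ l.length) :
    l.take n = (List.range n).map (fun i => l.getD i d) := by
  apply List.ext_getElem
  · simp [h]
  · intro i h1 h2
    simp only [List.getElem_take, List.getElem_map, List.getElem_range]
    rw [List.getD_eq_getElem l d (by simp at h1; omega)]

-- congruence for flatMap over range
theorem flatMap_range_congr {β : Type} (n : Nat) (f g : Nat → List β)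
    (h : ∀ i < n, f i = g i) :
    (List.range n).flatMap f = (List.range n).flatMap g := by
  simp only [List.flatMap_def]
  exact congrArg List.flatten (List.map_congr_left (fun i hi => h i (List.mem_range.mp hi)))

theorem flat_map_length {β : Type} (c : Nat) (g : Nat → Nat → β) (n : Nat) :
    ((List.range n).flatMap (fun i => (List.range c).map (g i))).length = n * c := by
  induction n with
  | zero => simp
  | succ m ih =>
    rw [List.range_succ, List.flatMap_append]
    simp [ih, Nat.succ_mul]

-- element p of a flatMap of uniform blocks of length c
theorem flat_map_getElem? {β : Type} (c : Nat) (hc : 0 < c) (g : Nat → Nat → β) (n p : Nat) :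
    ((List.range n).flatMap (fun i => (List.range c).map (g i)))[p]?
    = if p < n * c then some (g (p / c) (p % c)) else none := by
  induction n with
  | zero => simp
  | succ m ih =>
    rw [List.range_succ, List.flatMap_append]
    simp only [List.flatMap_cons, List.flatMap_nil, List.append_nil]
    rw [List.getElem?_append, flat_map_length, ih]
    by_cases hp : p < m * c
    · rw [if_pos hp, if_pos hp, if_pos (by rw [Nat.succ_mul]; omega)]
    · rw [if_neg hp]
      by_cases hq : p < (m + 1) * c
      · have h1 : m * c ≤ p := Nat.le_of_not_lt hp
        have hk : p / c = m := Nat.div_eq_of_lt_le h1 hq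
        have hmod : p % c = p - m * c := by
          have h2 := Nat.div_add_mod p c
          rw [hk, Nat.mul_comm] at h2
          omega
        have hj : p - m * c < c := by rw [Nat.succ_mul] at hq; omega
        rw [if_pos hq, List.getElem?_map, List.getElem?_range hj]
        simp [hk, hmod]
      · rw [if_neg hq, List.getElem?_map,
            List.getElem?_eq_none (by simp only [List.length_range]; rw [Nat.succ_mul] at hq; omega)]
        rfl

-- element p of B's normal form
theorem bnf_getElem? (A : List (List (List Int))) (w : Nat) (hw : 0 < w) (p : Nat) :
    (bnf A w)[p]?
    = if p < 25 * w
      then some (entA A (((p / w) % 5 : Nat):Int) (((p / w) / 5 : Nat):Int) ((p % w : Nat):Int))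
      else none := by
  have hin : ∀ y : Nat, (List.range 5).flatMap (fun x => (List.range w).map
        (fun z => PySem.Int.toStr (((A.getD x []).getD y []).getD z 0)))
      = (List.range (5 * w)).map
        (fun j => PySem.Int.toStr (((A.getD (j / w) []).getD y []).getD (j % w) 0)) := by
    intro y
    apply List.ext_getElem?
    intro q
    rw [flat_map_getElem? w hw _ 5 q, List.getElem?_map]
    by_cases hq : q < 5 * w
    · rw [List.getElem?_range hq, if_pos hq]
      rfl
    · rw [List.getElem?_eq_none (by simp only [List.length_range]; omega), if_neg hq]
      rfl
  unfold bnf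
  rw [flatMap_range_congr 5 _ _ (fun y _ => hin y)]
  rw [flat_map_getElem? (5 * w) (by positivity)
      (fun y j => PySem.Int.toStr (((A.getD (j / w) []).getD y []).getD (j % w) 0)) 5 p]
  rw [show 5 * (5 * w) = 25 * w by ring]
  by_cases hp : p < 25 * w
  · rw [if_pos hp, if_pos hp]
    have e1 : p / (5 * w) = (p / w) / 5 := by
      rw [Nat.div_div_eq_div_mul, Nat.mul_comm w 5]
    have e2 : (p % (5 * w)) / w = (p / w) % 5 := by
      have h := Nat.mod_mul_right_div_self p w 5
      rwa [Nat.mul_comm w 5] at h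
    have e3 : (p % (5 * w)) % w = p % w := Nat.mod_mod_of_dvd p ⟨5, by ring⟩
    rw [e1, e2, e3]
    simp only [entA, PySem.List.pyGetD_natCast, List.getD_eq_getElem?_getD]
  · rw [if_neg hp, if_neg hp]

-- the scattered buffer equals B's normal form
theorem core (w : Nat) (hw0 : 0 < w) (A : List (List (List Int))) :
    ((PySem.List.pyRange 0 (5:Int) 1).foldl (fun SaL x =>
      (PySem.List.pyRange 0 (5:Int) 1).foldl (fun SaL y =>
        (PySem.List.pyRange 0 (w:Int) 1).foldl (fun SaL z =>
          PySem.List.pySetD SaL ((w:Int) * (5 * y + x) + z) (entA A x y z)) SaL) SaL)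
      (List.replicate (25 * w) "x"))
    = bnf A w := by
  apply List.ext_getElem?
  intro p
  have hx := xfold_getElem? w hw0 A 5 le_rfl (List.replicate (25 * w) "x") (by simp) p
  rw [show ((5:Nat):Int) = (5:Int) by norm_num] at hx
  rw [hx, bnf_getElem? A w hw0 p]
  by_cases hp : p < 25 * w
  · rw [if_pos ⟨hp, by omega⟩, if_pos hp]
  · rw [if_neg (by tauto), if_neg hp, List.getElem?_replicate, if_neg (by omega)]

theorem slice_to5 {α : Type} (l : List α) : PySem.List.slice l none (some 5) = l.take 5 := by
  have h := PySem.List.slice_to (xs := l) (b := (5:Int)) (by norm_num)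
  simpa using h

-- B's zip-transpose flatten equals the normal form, given the shape the precondition grants
theorem alt_list_eq_bnf (w : Nat) (A : List (List (List Int)))
    (h5 : 5 ≤ A.length)
    (hrow : ∀ x < 5, 5 ≤ (A.getD x []).length)
    (hin : ∀ x < 5, ∀ y < 5, w ≤ ((A.getD x []).getD y []).length) :
    ((pyZipStar [] ((PySem.List.slice A none (some 5)).map (fun row => PySem.List.slice row none (some 5)))).flatMap
      (fun col => col.flatMap (fun inner =>
        (PySem.List.slice inner none (some ((w:Nat):Int))).map PySem.Int.toStr)))
    = bnf A w := by
  simp only [slice_to5, PySem.List.slice_to_natCast]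
  rw [take_eq_range_map ([] : List (List Int)) A 5 h5, List.map_map]
  unfold pyZipStar
  have hlens : (((List.range 5).map ((fun row => row.take 5) ∘ fun x => A.getD x [])).map List.length)
      = (List.range 5).map (fun _ => 5) := by
    rw [List.map_map]
    apply List.map_congr_left
    intro x hx
    have hx5 := hrow x (List.mem_range.mp hx)
    simp only [Function.comp_apply, List.length_take]
    omega
  rw [hlens]
  rw [show (((List.range 5).map (fun _ => (5:Nat))).min?).getD 0 = 5 by decide]
  rw [List.flatMap_map]
  unfold bnf
  apply flatMap_range_congr
  intro y hy
  rw [List.map_map, List.flatMap_map]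
  apply flatMap_range_congr
  intro x hx
  have hg : ((A.getD x []).take 5).getD y [] = (A.getD x []).getD y [] := by
    simp [List.getD_eq_getElem?_getD, hy]
  simp only [Function.comp_apply, hg]
  rw [take_eq_range_map (0:Int) _ w (hin x hx y hy), List.map_map]
  rfl

theorem getW_spec (s : Int) :
    (s = 25 ∨ s = 50 ∨ s = 100 ∨ s = 200 ∨ s = 400 ∨ s = 800 ∨ s = 1600) ∨ getW s = -1 := by
  by_cases h1 : s = 25
  · exact Or.inl (Or.inl h1)
  by_cases h2 : s = 50
  · exact Or.inl (Or.inr (Or.inl h2))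
  by_cases h3 : s = 100
  · exact Or.inl (Or.inr (Or.inr (Or.inl h3)))
  by_cases h4 : s = 200
  · exact Or.inl (Or.inr (Or.inr (Or.inr (Or.inl h4))))
  by_cases h5 : s = 400
  · exact Or.inl (Or.inr (Or.inr (Or.inr (Or.inr (Or.inl h5)))))
  by_cases h6 : s = 800
  · exact Or.inl (Or.inr (Or.inr (Or.inr (Or.inr (Or.inr (Or.inl h6))))))
  by_cases h7 : s = 1600
  · exact Or.inl (Or.inr (Or.inr (Or.inr (Or.inr (Or.inr (Or.inr h7))))))
  right
  simp [getW, PySem.Dict.getD, PySem.Dict.get?, PySem.Dict.insert, PySem.Dict.empty, List.find?,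
    beq_eq_false_iff_ne.mpr (Ne.symm h1), beq_eq_false_iff_ne.mpr (Ne.symm h2),
    beq_eq_false_iff_ne.mpr (Ne.symm h3), beq_eq_false_iff_ne.mpr (Ne.symm h4),
    beq_eq_false_iff_ne.mpr (Ne.symm h5), beq_eq_false_iff_ne.mpr (Ne.symm h6),
    beq_eq_false_iff_ne.mpr (Ne.symm h7)]

theorem join_rep (n : Nat) :
    PySem.Str.join "" (List.replicate n "x") = String.ofList (List.replicate n 'x') := by
  apply String.toList_inj.mp
  rw [PySem.Str.toList_join]
  rw [show ("".toList) = ([] : List Char) from rfl]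
  rw [show (List.map String.toList (List.replicate n "x")) = List.map (fun c => [c]) (List.replicate n 'x') from by
    rw [List.map_replicate, List.map_replicate, show "x".toList = ['x'] from rfl]]
  rw [PySem.Chars.join_nil_singletons]
  simp

-- any strlen in the size table: both ports agree
theorem case_lemma (A : List (List (List Int))) (w : Nat) (hw : 0 < w) (strlen : Int)
    (hgw : getW strlen = (w:Int)) (hlen : strlen = ((25 * w : Nat) : Int))
    (hpre : Pre_convertMatrixToString A strlen) :
    convertMatrixToString A strlen = convertMatrixToString_alt A strlen := by
  rcases hpre with hdef | ⟨h5, hrow⟩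
  · rw [hgw] at hdef; omega
  have hrow' : ∀ x < 5, 5 ≤ (A.getD x []).length := by
    intro x hx
    have hxA : x < A.length := by omega
    have hmem : A.getD x [] ∈ A.take 5 := by
      rw [List.getD_eq_getElem A [] hxA]
      have he : A[x] = (A.take 5)[x]'(by simp only [List.length_take]; omega) :=
        (List.getElem_take).symm
      rw [he]
      exact List.getElem_mem _
    exact (hrow _ hmem).1
  have hin' : ∀ x < 5, ∀ y < 5, w ≤ ((A.getD x []).getD y []).length := by
    intro x hx y hy
    have hxA : x < A.length := by omega
    have hmem : A.getD x [] ∈ A.take 5 := by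
      rw [List.getD_eq_getElem A [] hxA]
      have he : A[x] = (A.take 5)[x]'(by simp only [List.length_take]; omega) :=
        (List.getElem_take).symm
      rw [he]
      exact List.getElem_mem _
    have h2 := (hrow _ hmem).2
    have hyR : y < (A.getD x []).length := by have := hrow' x hx; omega
    have hmem2 : (A.getD x []).getD y [] ∈ (A.getD x []).take 5 := by
      rw [List.getD_eq_getElem _ [] hyR]
      have he : (A.getD x [])[y] = ((A.getD x []).take 5)[y]'(by simp only [List.length_take]; omega) :=
        (List.getElem_take).symm
      rw [he]
      exact List.getElem_mem _
    have h3 := h2 _ hmem2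
    rw [hgw] at h3
    simpa using h3
  simp only [convertMatrixToString, convertMatrixToString_alt, hgw]
  rw [if_neg (by omega)]
  rw [hlen, PySem.List.pyRepeat_singleton]
  rw [show (((25 * w : Nat):Int)).toNat = 25 * w by omega]
  have hc := core w hw A
  simp only [entA] at hc
  have hb := alt_list_eq_bnf w A h5 hrow' hin'
  exact congrArg (PySem.Str.join "") (hc.trans hb.symm)

-- ===== VERDICT (by name: the statement is the Claim_ definition above) =====
theorem convertMatrixToString_spec : Claim_equal_convertMatrixToString := by
  intro A strlen hdom hpre
  unfold Spec_convertMatrixToString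
  rcases getW_spec strlen with (h | h | h | h | h | h | h) | hdef
  · exact case_lemma A 1 (by norm_num) strlen (by rw [h]; decide) (by rw [h]; norm_num) hpre
  · exact case_lemma A 2 (by norm_num) strlen (by rw [h]; decide) (by rw [h]; norm_num) hpre
  · exact case_lemma A 4 (by norm_num) strlen (by rw [h]; decide) (by rw [h]; norm_num) hpre
  · exact case_lemma A 8 (by norm_num) strlen (by rw [h]; decide) (by rw [h]; norm_num) hpre
  · exact case_lemma A 16 (by norm_num) strlen (by rw [h]; decide) (by rw [h]; norm_num) hpre
  · exact case_lemma A 32 (by norm_num) strlen (by rw [h]; decide) (by rw [h]; norm_num) hpre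
  · exact case_lemma A 64 (by norm_num) strlen (by rw [h]; decide) (by rw [h]; norm_num) hpre
  · simp only [convertMatrixToString, convertMatrixToString_alt, hdef, if_pos]
    rw [PySem.List.pyRange_one_eq_nil (by norm_num : (-1:Int) ≤ 0)]
    simp only [List.foldl_nil, List.foldl_fixed]
    rw [PySem.List.pyRepeat_singleton, PySem.List.pyRepeat_singleton]
    exact join_rep strlen.toNat
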